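-- pv_equiv track=rewrite | github.com/Woffee/RelPath | KP_retrieval.py | get_limit_text
-- ===== SOURCE A (Python) =====
-- def get_limit_text(text, limit = 4096):
--     cnt = 0
--     for i in range(len(text)):
--         if text[i] in ['\t', '\n', ' ']:
--             cnt += 1
--         if cnt >= limit:
--             return text[:i]
--     return text
-- ===== SOURCE B (Python) =====
-- def get_limit_text(text, limit = 4096):
--     if limit <= 0:
--         return text[:0]
--     positions = [i for i, ch in enumerate(text) if ch in ('\t', '\n', ' ')]
--     if len(positions) >= limit:
--         return text[:positions[limit - 1]]
--     return text
-- ===== Notes on version B (the rewrite author's own statement) =====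
-- stated objective: alternative
-- what changed: Replaces A's incremental counter with early return inside the scan by materializing the list of whitespace positions once and picking the limit-th position directly.
import Mathlib
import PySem

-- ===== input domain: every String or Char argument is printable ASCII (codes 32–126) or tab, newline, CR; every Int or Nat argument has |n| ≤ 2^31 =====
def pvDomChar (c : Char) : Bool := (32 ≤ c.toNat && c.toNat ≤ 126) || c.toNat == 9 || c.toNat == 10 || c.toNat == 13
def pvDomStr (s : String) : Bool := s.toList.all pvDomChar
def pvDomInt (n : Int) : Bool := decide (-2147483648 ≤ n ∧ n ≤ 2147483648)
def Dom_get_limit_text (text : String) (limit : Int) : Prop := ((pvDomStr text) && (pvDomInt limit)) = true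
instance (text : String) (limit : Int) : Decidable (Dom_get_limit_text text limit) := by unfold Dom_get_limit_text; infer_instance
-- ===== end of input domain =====

-- B replaces A's incremental counter/early-return scan with a one-shot whitespace-position
-- table and a direct lookup of the limit-th position (objective: alternative structure).

-- the membership test `ch in ('\t', '\n', ' ')` / `text[i] in ['\t','\n',' ']`
def pvIsWs (c : Char) : Bool := ['\t', '\n', ' '].contains c

-- ===== PORT A =====
-- A's `for i in range(len(text))` with early return: structural recursion over the remaining
-- characters carrying the index i and counter cnt; `some i` is the early `return text[:i]`,
-- `none` is falling off the loop (`return text`).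
def pvALoop (limit : Int) : List Char → Nat → Int → Option Nat
  | [], _, _ => none
  | c :: rs, i, cnt =>
    let cnt' := if pvIsWs c then cnt + 1 else cnt
    if limit ≤ cnt' then some i else pvALoop limit rs (i + 1) cnt'

def get_limit_text (text : String) (limit : Int) : String :=
  match pvALoop limit text.toList 0 0 with
  | some i => String.ofList (text.toList.take i)   -- text[:i] with 0 ≤ i: exact
  | none => text

-- ===== PORT B =====
-- B's comprehension `[i for i, ch in enumerate(text) if ch in ('\t','\n',' ')]`
-- (`i` is the offset from which enumeration starts; B calls it with 0)
def pvPos (rest : List Char) (i : Int) : List Int :=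
  ((PySem.List.enumerate rest i).filter (fun p => pvIsWs p.2)).map (·.1)

def get_limit_text_alt (text : String) (limit : Int) : String :=
  if limit ≤ 0 then "" else   -- text[:0]
    let positions := pvPos text.toList 0
    if limit ≤ (positions.length : Int) then
      -- text[:positions[limit-1]]; the index exists (length check) and is ≥ 0: exact
      String.ofList (text.toList.take (positions.getD ((limit - 1).toNat) 0).toNat)
    else text

-- ===== PRECONDITION & SPEC =====
def Spec_get_limit_text (text : String) (limit : Int) (out : String) : Prop := out = get_limit_text_alt text limit
instance (text : String) (limit : Int) (out : String) : Decidable (Spec_get_limit_text text limit out) := by unfold Spec_get_limit_text; infer_instance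

-- ===== CLAIM (what is proved, stated in full; the proofs are below) =====
def Claim_equal_get_limit_text : Prop := ∀ (text : String) (limit : Int), Dom_get_limit_text text limit → Spec_get_limit_text text limit (get_limit_text text limit)

-- ===== LEMMAS AND PROOFS =====

theorem pvPos_nil (i : Int) : pvPos [] i = [] := rfl

theorem pvPos_cons (c : Char) (rs : List Char) (i : Int) :
    pvPos (c :: rs) i =
      if pvIsWs c then i :: pvPos rs (i + 1) else pvPos rs (i + 1) := by
  simp only [pvPos, PySem.List.enumerate_cons, List.filter]
  cases h : pvIsWs c <;> simp

-- the loop invariant: with cnt < limit, A's loop returns the (limit - cnt)-th whitespace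
-- position of the remaining suffix (or none if there are fewer than limit - cnt of them)
theorem pvALoop_eq (limit : Int) (rest : List Char) (i : Nat) (cnt : Int)
    (h : cnt < limit) :
    pvALoop limit rest i cnt =
      (if limit - cnt ≤ ((pvPos rest (i : Int)).length : Int) then
        some ((pvPos rest (i : Int)).getD ((limit - cnt - 1).toNat) 0).toNat
      else none) := by
  induction rest generalizing i cnt with
  | nil => rw [pvPos_nil]; simp [pvALoop]; omega
  | cons c rs ih =>
    rw [pvPos_cons]
    by_cases hc : pvIsWs c
    · rw [if_pos hc]
      by_cases hl : limit ≤ cnt + 1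
      · have h1 : limit - cnt = 1 := by omega
        have hA : pvALoop limit (c :: rs) i cnt = some i := by
          simp [pvALoop, hc, hl]
        have hlen : limit - cnt ≤ (((i : Int) :: pvPos rs ((i : Int) + 1)).length : Int) := by
          simp; omega
        rw [hA, if_pos hlen, h1]
        simp
      · have h2 : cnt + 1 < limit := by omega
        have hA : pvALoop limit (c :: rs) i cnt = pvALoop limit rs (i + 1) (cnt + 1) := by
          simp [pvALoop, hc, hl]
        rw [hA, ih (i + 1) (cnt + 1) h2]
        have hcast : ((i + 1 : Nat) : Int) = (i : Int) + 1 := by push_cast; ring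
        rw [hcast]
        have hk : (limit - cnt - 1).toNat = (limit - (cnt + 1) - 1).toNat + 1 := by omega
        by_cases hfit : limit - (cnt + 1) ≤ ((pvPos rs ((i : Int) + 1)).length : Int)
        · have hfit' : limit - cnt ≤ (((i : Int) :: pvPos rs ((i : Int) + 1)).length : Int) := by
            simp; omega
          rw [if_pos hfit, if_pos hfit', hk, List.getD_cons_succ]
        · have hfit' : ¬ limit - cnt ≤ (((i : Int) :: pvPos rs ((i : Int) + 1)).length : Int) := by
            simp; omega
          rw [if_neg hfit, if_neg hfit']
    · rw [if_neg hc]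
      have hA : pvALoop limit (c :: rs) i cnt = pvALoop limit rs (i + 1) cnt := by
        have hnl : ¬ limit ≤ cnt := by omega
        simp [pvALoop, hc, hnl]
      rw [hA, ih (i + 1) cnt h]
      have hcast : ((i + 1 : Nat) : Int) = (i : Int) + 1 := by push_cast; ring
      rw [hcast]

-- with limit ≤ 0, A early-returns text[:0] = "" on the first character (or returns "" = text if empty)
theorem pvA_nonpos (text : String) (limit : Int) (h : limit ≤ 0) :
    get_limit_text text limit = "" := by
  unfold get_limit_text
  cases hcs : text.toList with
  | nil =>
    have ht : text = "" := by
      have := congrArg String.ofList hcs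
      rwa [String.ofList_toList] at this
    rw [ht]
    rfl
  | cons c rs =>
    have hle : limit ≤ (if pvIsWs c then (0 : Int) + 1 else 0) := by
      split <;> omega
    simp only [pvALoop, if_pos hle]
    rfl

-- ===== VERDICT (by name: the statement is the Claim_ definition above) =====
theorem get_limit_text_spec : Claim_equal_get_limit_text := by
  intro text limit _
  unfold Spec_get_limit_text get_limit_text_alt
  by_cases h : limit ≤ 0
  · rw [if_pos h, pvA_nonpos text limit h]
  · rw [if_neg h]
    have hlt : (0 : Int) < limit := by omega
    unfold get_limit_text
    rw [show pvALoop limit text.toList 0 0 =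
        (if limit - 0 ≤ ((pvPos text.toList ((0 : Nat) : Int)).length : Int) then
          some ((pvPos text.toList ((0 : Nat) : Int)).getD ((limit - 0 - 1).toNat) 0).toNat
        else none) from pvALoop_eq limit text.toList 0 0 hlt]
    have h0 : ((0 : Nat) : Int) = (0 : Int) := rfl
    rw [h0]
    have hs : limit - 0 = limit := by ring
    rw [hs]
    by_cases hfit : limit ≤ ((pvPos text.toList 0).length : Int)
    · rw [if_pos hfit, if_pos hfit]
    · rw [if_neg hfit, if_neg hfit]
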